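-- pv_equiv track=rewrite | github.com/SerranoZz/compilador_minijava | classes/otimizer.py | propagacao_copia
-- ===== SOURCE A (Python) =====
-- def propagacao_copia(block):
--     one_value = []
--     for i, line in enumerate(block):
--         itens = line.split()
--         if len(itens) == 3 and itens[1] == ':=':
--             one_value.append([itens[0],itens[2]])
--             #block.pop(i)
--     for i, line in enumerate(block):
--         for itens in one_value:
--             if itens[0] in line.split()[1:]:
--                 new_line = line.split()[1:]
--                 new_line[new_line.index(itens[0])] = itens[1]
--                 block[i] = f"{line.split()[0]} {' '.join(new_line)}"
--     return block
-- ===== SOURCE B (Python) =====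
-- def propagacao_copia(block):
--     # Copy propagation: index copy statements once, then substitute every
--     # known copy variable in each line's operand tokens in a single pass.
--     copies = {}
--     for line in block:
--         t = line.split()
--         if len(t) == 3 and t[1] == ':=':
--             copies[t[0]] = t[2]
--     out = []
--     for line in block:
--         t = line.split()
--         if any(tok in copies for tok in t[1:]):
--             out.append(t[0] + ' ' + ' '.join(copies.get(tok, tok) for tok in t[1:]))
--         else:
--             out.append(line)
--     return out
-- ===== Notes on version B (the rewrite author's own statement) =====
-- stated objective: alternative
-- what changed: B builds a dict of copy statements once and rewrites each line in a single pass, substituting every operand token that is a known copy variable, instead of A's nested loop that rescans the whole copy list for every line and rewrites only one token; return-value equivalence only: A mutates block in place, B is pure.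
-- intended difference: On blocks where some line's operand tokens hold, away from the single position A rewrites, a token whose copy-statement value differs from it, A leaves that token unsubstituted (it rewrites only the first occurrence of the last-defined matching variable) while B substitutes every copy variable; full substitution is what copy propagation intends. — e.g. on propagacao_copia(["a := b", "c := d", "z + a c"]): A returns ["a := b", "c := d", "z + a d"], B returns ["a := b", "c := d", "z + b d"]
import Mathlib
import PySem

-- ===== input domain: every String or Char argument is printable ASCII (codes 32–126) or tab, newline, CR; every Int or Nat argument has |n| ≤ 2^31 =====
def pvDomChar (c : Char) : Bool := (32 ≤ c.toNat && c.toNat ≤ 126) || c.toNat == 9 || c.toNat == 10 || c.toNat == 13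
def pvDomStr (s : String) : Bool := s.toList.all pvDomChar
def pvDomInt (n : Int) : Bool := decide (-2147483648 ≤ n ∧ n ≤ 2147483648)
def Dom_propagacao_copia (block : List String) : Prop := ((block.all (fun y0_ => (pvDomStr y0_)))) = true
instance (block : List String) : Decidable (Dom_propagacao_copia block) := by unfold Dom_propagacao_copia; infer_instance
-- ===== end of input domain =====

-- B indexes the copy statements in a dict and substitutes every known copy variable per line in one pass (A rescans the copy list per line and rewrites only one token); return-value equivalence only: A mutates block in place, B is pure.


-- ===== PORT A =====
-- A mutates `block` in place and returns it; both ports model the RETURN value only.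
-- pcTl ports line.split()[1:]; pcCopy? ports the copy-statement step `itens = line.split();
-- if len(itens) == 3 and itens[1] == ':=':` yielding `[itens[0], itens[2]]` (none when the guard fails);
-- itens[0] is read via getD under that guard (in range, so exact); new_line.index exists by the membership guard.
def pcTl (l : String) : List String := (PySem.Str.split₀ l).tail

def pcCopy? (l : String) : Option (String × String) :=
  match PySem.Str.split₀ l with
  | [x, y, v] => if y = ":=" then some (x, v) else none
  | _ => none

def propagacao_copia (block : List String) : List String :=
  let one_value : List (String × String) := block.foldl (fun ov line =>
    match pcCopy? line with
    | some q => ov ++ [q]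
    | none => ov) []
  (List.range block.length).foldl (fun b i =>
    let line := b.getD i ""
    one_value.foldl (fun b itens =>
      if itens.1 ∈ pcTl line then
        b.set i ((PySem.Str.split₀ line).getD 0 "" ++ " " ++ PySem.Str.join " "
          ((pcTl line).set
            ((PySem.List.index? (pcTl line) itens.1).getD 0) itens.2))
      else b) b) block

-- ===== PORT B =====
def propagacao_copia_alt (block : List String) : List String :=
  let copies : PySem.Dict String String := block.foldl (fun d line =>
    let t := PySem.Str.split₀ line
    if t.length = 3 ∧ t.getD 1 "" = ":=" then d.insert (t.getD 0 "") (t.getD 2 "") else d)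
    PySem.Dict.empty
  block.map (fun line =>
    let t := PySem.Str.split₀ line
    if (t.drop 1).any (fun tok => (PySem.Dict.get? copies tok).isSome) then
      t.getD 0 "" ++ " " ++ PySem.Str.join " "
        ((t.drop 1).map (fun tok => (PySem.Dict.get? copies tok).getD tok))
    else line)

-- ===== PRECONDITION & SPEC =====
-- Spec-level helper D_ is phrased with: the last copy statement (read through A's parser
-- pcCopy?) satisfying a predicate.
def pcLast (b : List String) (p : String × String → Bool) : Option (String × String) :=
  ((b.filterMap pcCopy?).filter p).getLast?

def D_propagacao_copia (block : List String) : Prop :=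
  ∃ t ∈ block.map pcTl, ∃ p ∈ t.zipIdx,
    (pcLast block (·.1 == p.1)).any (·.2 != p.1) ∧
    (pcLast block (t.contains ·.1)).any (t.idxOf? ·.1 != some p.2)
instance (block : List String) : Decidable (D_propagacao_copia block) := by
  unfold D_propagacao_copia; infer_instance

def Spec_propagacao_copia (block : List String) (out : List String) : Prop :=
  ¬ D_propagacao_copia block → out = propagacao_copia_alt block
instance (block : List String) (out : List String) : Decidable (Spec_propagacao_copia block out) := by
  unfold Spec_propagacao_copia; infer_instance

def pvDiffWitness_propagacao_copia : List String := ["a := b", "c := d", "z + a c"]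
def pvDiffWitnessOut_propagacao_copia : (List String) × (List String) :=
  (["a := b", "c := d", "z + a d"], ["a := b", "c := d", "z + b d"])

-- ===== CLAIM (what is proved, stated in full; the proofs are below) =====
def Claim_unchanged_propagacao_copia : Prop := ∀ (block : List String), Dom_propagacao_copia block → Spec_propagacao_copia block (propagacao_copia block)
def Claim_changed_propagacao_copia : Prop := Dom_propagacao_copia (pvDiffWitness_propagacao_copia) ∧ D_propagacao_copia (pvDiffWitness_propagacao_copia) ∧ propagacao_copia (pvDiffWitness_propagacao_copia) = pvDiffWitnessOut_propagacao_copia.1 ∧ propagacao_copia_alt (pvDiffWitness_propagacao_copia) = pvDiffWitnessOut_propagacao_copia.2 ∧ pvDiffWitnessOut_propagacao_copia.1 ≠ pvDiffWitnessOut_propagacao_copia.2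
def Claim_exact_propagacao_copia : Prop := ∀ (block : List String), Dom_propagacao_copia block → D_propagacao_copia block → propagacao_copia block ≠ propagacao_copia_alt block

-- ===== LEMMAS AND PROOFS =====

def pcOv (block : List String) : List (String × String) :=
  block.filterMap pcCopy?

def pcLastm {α : Type} (p : α → Prop) [DecidablePred p] : List α → Option α
  | [] => none
  | x :: l => match pcLastm p l with
    | some y => some y
    | none => if p x then some x else none

-- the substitution the block's copy statements define for a token (last definition wins)
def pcVal (block : List String) (tok : String) : String :=
  ((pcLastm (fun p : String × String => p.1 = tok) (pcOv block)).map Prod.snd).getD tok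

-- the one tail position A rewrites in a line: first occurrence of the last-defined copy variable present
def pcIdx (block : List String) (line : String) : Nat :=
  (PySem.List.index? (pcTl line)
    (((pcLastm (fun p : String × String => p.1 ∈ pcTl line) (pcOv block)).map Prod.fst).getD "")).getD 0

-- the line A rebuilds: f"{t[0]} {' '.join(tail with first lhs replaced by rhs)}"
def pcR (line lhs rhs : String) : String :=
  (PySem.Str.split₀ line).getD 0 "" ++ " " ++ PySem.Str.join " "
    ((pcTl line).set ((PySem.List.index? (pcTl line) lhs).getD 0) rhs)

-- B's dict of copies and B's per-line result
def pcDictB (block : List String) : PySem.Dict String String :=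
  block.foldl (fun d line =>
    let t := PySem.Str.split₀ line
    if t.length = 3 ∧ t.getD 1 "" = ":=" then d.insert (t.getD 0 "") (t.getD 2 "") else d)
    PySem.Dict.empty

def pcQ (block : List String) (line : String) : String :=
  if (pcTl line).any (fun tok => (PySem.Dict.get? (pcDictB block) tok).isSome) then
    (PySem.Str.split₀ line).getD 0 "" ++ " " ++ PySem.Str.join " "
      ((pcTl line).map (fun tok => (PySem.Dict.get? (pcDictB block) tok).getD tok))
  else line

lemma pcLastm_append_singleton {α : Type} (p : α → Prop) [DecidablePred p] (l : List α) (x : α) :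
    pcLastm p (l ++ [x]) = if p x then some x else pcLastm p l := by
  induction l with
  | nil => by_cases h : p x <;> simp [pcLastm, h]
  | cons y l ih =>
    simp only [List.cons_append, pcLastm, ih]
    by_cases h : p x <;> simp [h]

lemma pcLastm_mem {α : Type} (p : α → Prop) [DecidablePred p] :
    ∀ (l : List α) (y : α), pcLastm p l = some y → y ∈ l ∧ p y := by
  intro l
  induction l with
  | nil => intro y h; cases h
  | cons x l ih =>
    intro y h
    simp only [pcLastm] at h
    cases hm : pcLastm p l with
    | some z =>
      rw [hm] at h; cases h
      obtain ⟨h1, h2⟩ := ih _ hm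
      exact ⟨List.mem_cons_of_mem _ h1, h2⟩
    | none =>
      rw [hm] at h
      by_cases hp : p x
      · rw [if_pos hp] at h; cases h; exact ⟨List.mem_cons_self, hp⟩
      · rw [if_neg hp] at h; cases h

lemma pcLastm_isSome {α : Type} (p : α → Prop) [DecidablePred p] :
    ∀ (l : List α) (x : α), x ∈ l → p x → (pcLastm p l).isSome := by
  intro l
  induction l with
  | nil => intro x h; cases h
  | cons y l ih =>
    intro x hmem hp
    simp only [pcLastm]
    cases hm : pcLastm p l with
    | some z => rfl
    | none =>
      rcases List.mem_cons.mp hmem with h | h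
      · subst h; rw [if_pos hp]; rfl
      · have := ih x h hp; rw [hm] at this; cases this

-- the last element satisfying P also is the last satisfying any Q it meets, when Q implies P on l
lemma pcLastm_proj {α : Type} (P Q : α → Prop) [DecidablePred P] [DecidablePred Q] :
    ∀ (l : List α) (y : α), pcLastm P l = some y → Q y → (∀ z ∈ l, Q z → P z) →
      pcLastm Q l = some y := by
  intro l
  induction l with
  | nil => intro y h; cases h
  | cons x l ih =>
    intro y h hQ himp
    simp only [pcLastm] at h ⊢
    cases hm : pcLastm P l with
    | some z =>
      rw [hm] at h; cases h
      rw [ih _ hm hQ (fun z hz => himp z (List.mem_cons_of_mem _ hz))]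
    | none =>
      rw [hm] at h
      have hQl : pcLastm Q l = none := by
        cases hq : pcLastm Q l with
        | none => rfl
        | some z =>
          obtain ⟨hzmem, hzQ⟩ := pcLastm_mem Q l z hq
          have hs := pcLastm_isSome P l z hzmem (himp z (List.mem_cons_of_mem _ hzmem) hzQ)
          rw [hm] at hs; cases hs
      rw [hQl]
      by_cases hp : P x
      · rw [if_pos hp] at h; cases h; rw [if_pos hQ]
      · rw [if_neg hp] at h; cases h

-- A's inner loop over one_value: only the LAST matching copy survives the overwrites
lemma pcFoldl_set_lastm {α : Type} (p : α → Prop) [DecidablePred p] (F : α → String) (i : Nat)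
    (ov : List α) : ∀ b : List String,
    ov.foldl (fun b it => if p it then b.set i (F it) else b) b
      = match pcLastm p ov with
        | none => b
        | some it => b.set i (F it) := by
  induction ov with
  | nil => intro b; simp [pcLastm]
  | cons x ov ih =>
    intro b
    simp only [List.foldl_cons, pcLastm]
    by_cases h : p x
    · rw [if_pos h, ih]
      cases hm : pcLastm p ov with
      | none => simp [h]
      | some it => simp [List.set_set]
    · rw [if_neg h, ih]
      cases hm : pcLastm p ov <;> simp [h]

-- A's outer loop: the step touches exactly index i, reading the ORIGINAL line there
lemma pcFoldl_range' (step : List String → Nat → List String) (F : String → String)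
    (h : ∀ (pre : List String) (x : String) (rest : List String),
      step (pre ++ x :: rest) pre.length = pre ++ F x :: rest) :
    ∀ (rest pre : List String),
      (List.range' pre.length rest.length).foldl step (pre ++ rest) = pre ++ rest.map F := by
  intro rest
  induction rest with
  | nil => intro pre; simp
  | cons x rest ih =>
    intro pre
    rw [List.length_cons, List.range'_succ, List.foldl_cons, h pre x rest]
    have h2 := ih (pre ++ [F x])
    simp only [List.length_append, List.length_cons, List.length_nil, List.append_assoc,
      List.singleton_append, List.map_cons] at h2 ⊢
    exact h2

lemma pcFoldl_range (step : List String → Nat → List String) (F : String → String)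
    (h : ∀ (pre : List String) (x : String) (rest : List String),
      step (pre ++ x :: rest) pre.length = pre ++ F x :: rest) (b : List String) :
    (List.range b.length).foldl step b = b.map F := by
  have := pcFoldl_range' step F h b []
  simpa [List.range_eq_range'] using this

lemma pcFoldl_append_id {γ : Type} : ∀ (l : List γ) (d : List γ),
    l.foldl (fun acc x => acc ++ [x]) d = d ++ l := by
  intro l
  induction l with
  | nil => intro d; simp
  | cons x l ih => intro d; simp [ih]

-- a conditional-collect loop is a fold over the filterMap
lemma pcFoldl_filterMap {α β γ : Type} (f : α → Option γ) (g : β → γ → β) :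
    ∀ (l : List α) (d : β),
      l.foldl (fun d x => (f x).elim d (g d)) d
        = (l.filterMap f).foldl g d := by
  intro l
  induction l with
  | nil => intro d; simp
  | cons x l ih =>
    intro d
    cases h : f x <;> simp [h, ih]

-- the ports' copy-statement guard, re-read as the pattern pcCopy? matches
lemma pcStep_eq (line : String) :
    (if (PySem.Str.split₀ line).length = 3 ∧ (PySem.Str.split₀ line).getD 1 "" = ":=" then
      some ((PySem.Str.split₀ line).getD 0 "", (PySem.Str.split₀ line).getD 2 "") else none)
      = pcCopy? line := by
  unfold pcCopy?
  cases h : PySem.Str.split₀ line with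
  | nil => simp [h]
  | cons a t1 =>
    cases t1 with
    | nil => simp [h]
    | cons b t2 =>
      cases t2 with
      | nil => simp [h]
      | cons c t3 =>
        cases t3 with
        | nil =>
          simp only [h, List.length_cons, List.length_nil, List.getD_eq_getElem?_getD]
          by_cases hb : b = ":=" <;> simp [hb]
        | cons e t4 => simp [h]

-- A's first loop builds exactly pcOv
lemma pcOv_eq (block : List String) :
    block.foldl (fun ov line =>
      match pcCopy? line with
      | some q => ov ++ [q]
      | none => ov) [] = pcOv block := by
  have h1 : block.foldl (fun ov line =>
      match pcCopy? line with
      | some q => ov ++ [q]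
      | none => ov) []
      = block.foldl (fun ov line => (pcCopy? line).elim ov (fun q => ov ++ [q])) [] := by
    apply PySem.List.foldl_congr_mem
    intro acc line _
    cases h : pcCopy? line <;> simp [h]
  rw [h1]
  exact (pcFoldl_filterMap pcCopy? (fun ov p => ov ++ [p]) block []).trans
    (by simpa [pcOv] using pcFoldl_append_id (block.filterMap pcCopy?) [])

-- B's dict lookup = rhs of the last copy statement for that variable
lemma pcDictB_get (block : List String) (k : String) :
    PySem.Dict.get? (pcDictB block) k
      = (pcLastm (fun p : String × String => p.1 = k) (pcOv block)).map Prod.snd := by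
  have h1 : pcDictB block
      = (pcOv block).foldl (fun d p => d.insert p.1 p.2) PySem.Dict.empty := by
    have h2 : pcDictB block
        = block.foldl (fun d line =>
          (pcCopy? line).elim d (fun p => d.insert p.1 p.2))
          PySem.Dict.empty := by
      unfold pcDictB
      apply PySem.List.foldl_congr_mem
      intro acc line _
      rw [← pcStep_eq]
      by_cases h : (PySem.Str.split₀ line).length = 3 ∧ (PySem.Str.split₀ line).getD 1 "" = ":="
      · dsimp only
        rw [if_pos h, if_pos h]
        rfl
      · dsimp only
        rw [if_neg h, if_neg h]
        rfl
    rw [h2]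
    exact pcFoldl_filterMap pcCopy? (fun d p => d.insert p.1 p.2) block PySem.Dict.empty
  rw [h1]
  have hgen : ∀ (l : List (String × String)),
      PySem.Dict.get? (l.foldl (fun d p => d.insert p.1 p.2) PySem.Dict.empty) k
        = (pcLastm (fun p : String × String => p.1 = k) l).map Prod.snd := by
    intro l
    induction l using List.reverseRecOn with
    | nil => simp [PySem.Dict.get?_empty, pcLastm]
    | append_singleton l x ih =>
      rw [List.foldl_append, List.foldl_cons, List.foldl_nil,
        pcLastm_append_singleton, PySem.Dict.get?_insert]
      by_cases h : k = x.1
      · rw [if_pos h, if_pos h.symm]; rfl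
      · rw [if_neg h, if_neg (fun hx => h hx.symm), ih]
  exact hgen _

-- A's per-line result
def pcPer (block : List String) (line : String) : String :=
  match pcLastm (fun p : String × String => p.1 ∈ pcTl line) (pcOv block) with
  | none => line
  | some y => pcR line y.1 y.2

lemma pcA_eq (block : List String) : propagacao_copia block = block.map (pcPer block) := by
  unfold propagacao_copia
  simp only []
  rw [pcOv_eq]
  apply pcFoldl_range
  intro pre x rest
  have hline : (pre ++ x :: rest).getD pre.length "" = x := by
    simp [List.getD_eq_getElem?_getD]
  simp only [hline]
  have hfold := pcFoldl_set_lastm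
    (fun it : String × String => it.1 ∈ pcTl x)
    (fun it : String × String => (PySem.Str.split₀ x).getD 0 "" ++ " " ++ PySem.Str.join " "
      ((pcTl x).set ((PySem.List.index? (pcTl x) it.1).getD 0) it.2))
    pre.length (pcOv block) (pre ++ x :: rest)
  rw [hfold]
  unfold pcPer
  cases hm : pcLastm (fun p : String × String => p.1 ∈ pcTl x) (pcOv block) with
  | none => rfl
  | some y =>
    dsimp only
    rw [List.set_append_right _ _ (le_refl _), Nat.sub_self, List.set_cons_zero]
    rfl

lemma pcB_eq (block : List String) : propagacao_copia_alt block = block.map (pcQ block) := by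
  unfold propagacao_copia_alt pcQ pcDictB pcTl
  simp only [List.drop_one]

-- pcQ with the dict lookups replaced by their last-copy characterisation
lemma pcQ_eq (block : List String) (line : String) :
    pcQ block line
      = if (pcTl line).any (fun tok =>
            (pcLastm (fun p : String × String => p.1 = tok) (pcOv block)).isSome) then
          (PySem.Str.split₀ line).getD 0 "" ++ " " ++ PySem.Str.join " "
            ((pcTl line).map (pcVal block))
        else line := by
  unfold pcQ
  simp only [pcDictB_get, Option.isSome_map]
  rfl

-- the winner of A's scan is also the last copy statement for its own variable
lemma pcWin_proj (block : List String) (line : String) (p : String × String)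
    (hw : pcLastm (fun q : String × String => q.1 ∈ pcTl line) (pcOv block) = some p) :
    pcLastm (fun q : String × String => q.1 = p.1) (pcOv block) = some p :=
  pcLastm_proj _ _ (pcOv block) p hw rfl
    (fun z _ hz => by rw [hz]; exact (pcLastm_mem _ (pcOv block) p hw).2)

-- a token whose substitution is nontrivial has a last copy statement
lemma pcVal_ne_imp (block : List String) (tok : String) (h : pcVal block tok ≠ tok) :
    ∃ r, pcLastm (fun q : String × String => q.1 = tok) (pcOv block) = some r
      ∧ r ∈ pcOv block ∧ r.1 = tok := by
  cases hm : pcLastm (fun q : String × String => q.1 = tok) (pcOv block) with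
  | none => unfold pcVal at h; rw [hm] at h; simp at h
  | some r =>
    obtain ⟨h1, h2⟩ := pcLastm_mem _ (pcOv block) r hm
    exact ⟨r, rfl, h1, h2⟩

-- per line, with A's winner present: facts about the rewritten position
lemma pcIdx_eq (block : List String) (line : String) (p : String × String) (i₀ : Nat)
    (hw : pcLastm (fun q : String × String => q.1 ∈ pcTl line) (pcOv block) = some p)
    (hidx : PySem.List.index? (pcTl line) p.1 = some i₀) :
    pcIdx block line = i₀ := by
  unfold pcIdx
  rw [hw]
  simp only [Option.map_some, Option.getD_some]
  rw [hidx]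
  rfl

-- agreement on every line none of whose tokens D_'s condition names
lemma pcLine_eq (block : List String) (line : String)
    (h : ∀ j, j < (pcTl line).length →
      pcVal block ((pcTl line).getD j "") ≠ (pcTl line).getD j "" → j = pcIdx block line) :
    pcPer block line = pcQ block line := by
  rw [pcQ_eq]
  unfold pcPer
  cases hw : pcLastm (fun q : String × String => q.1 ∈ pcTl line) (pcOv block) with
  | none =>
    have hg : (pcTl line).any (fun tok =>
        (pcLastm (fun p : String × String => p.1 = tok) (pcOv block)).isSome) = false := by
      rw [List.any_eq_false]
      intro tok htok
      cases hm : pcLastm (fun p : String × String => p.1 = tok) (pcOv block) with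
      | none => simp
      | some r =>
        obtain ⟨hrmem, hrk⟩ := pcLastm_mem _ (pcOv block) r hm
        have hs := pcLastm_isSome (fun q : String × String => q.1 ∈ pcTl line) (pcOv block) r
          hrmem (by show r.1 ∈ pcTl line; rw [hrk]; exact htok)
        rw [hw] at hs; cases hs
    rw [hg]
    rfl
  | some p =>
    obtain ⟨hpmem, hptl⟩ := pcLastm_mem _ (pcOv block) p hw
    have hproj := pcWin_proj block line p hw
    have hg : (pcTl line).any (fun tok =>
        (pcLastm (fun q : String × String => q.1 = tok) (pcOv block)).isSome) = true :=
      List.any_eq_true.mpr ⟨p.1, hptl, by rw [hproj]; rfl⟩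
    obtain ⟨i₀, hidx⟩ := Option.isSome_iff_exists.mp
      ((PySem.List.index?_isSome_iff (pcTl line) p.1).mpr hptl)
    obtain ⟨hi₀len, hi₀val, -⟩ := PySem.List.getElem_of_index?_eq_some hidx
    have hpcidx := pcIdx_eq block line p i₀ hw hidx
    have hmap : (pcTl line).map (pcVal block) = (pcTl line).set i₀ p.2 := by
      apply List.ext_getElem (by simp)
      intro j hj1 hj2
      rw [List.getElem_map]
      by_cases hji : j = i₀
      · subst hji
        rw [List.getElem_set_self (by simpa using hj1)]
        have hval : (pcTl line)[j] = p.1 := hi₀val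
        rw [hval]
        unfold pcVal
        rw [hproj]
        rfl
      · rw [List.getElem_set_ne (fun hEq => hji hEq.symm)]
        by_contra hnt
        apply hji
        have hjlen : j < (pcTl line).length := by simpa using hj1
        have := h j hjlen (by rw [List.getD_eq_getElem _ _ hjlen]; exact hnt)
        rw [hpcidx] at this
        exact this
    rw [if_pos hg]
    dsimp only
    unfold pcR
    rw [hidx, hmap]
    rfl

-- ===== join-injectivity on whitespace-free nonempty tokens =====

-- the two halves around an absent separator character are unique
lemma pcSep_split (a : Char) : ∀ (p q r s : List Char), a ∉ p → a ∉ q →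
    p ++ a :: r = q ++ a :: s → p = q ∧ r = s := by
  intro p
  induction p with
  | nil =>
    intro q r s _ hq h
    cases q with
    | nil => simp at h; exact ⟨rfl, h⟩
    | cons c q' =>
      simp only [List.nil_append, List.cons_append, List.cons.injEq] at h
      exact absurd (h.1 ▸ List.mem_cons_self) hq
  | cons c p' ih =>
    intro q r s hp hq h
    cases q with
    | nil =>
      simp only [List.nil_append, List.cons_append, List.cons.injEq] at h
      exact absurd (h.1 ▸ List.mem_cons_self) hp
    | cons d q' =>
      simp only [List.cons_append, List.cons.injEq] at h
      obtain ⟨h1, h2⟩ := h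
      obtain ⟨h3, h4⟩ := ih q' r s (fun hm => hp (List.mem_cons_of_mem _ hm))
        (fun hm => hq (List.mem_cons_of_mem _ hm)) h2
      exact ⟨by rw [h1, h3], h4⟩

-- ' '-join is injective on same-length lists of nonempty space-free parts
lemma pcJoin_inj : ∀ (ps qs : List (List Char)), ps.length = qs.length →
    (∀ t ∈ ps, t ≠ [] ∧ ' ' ∉ t) → (∀ t ∈ qs, t ≠ [] ∧ ' ' ∉ t) →
    PySem.Chars.join [' '] ps = PySem.Chars.join [' '] qs → ps = qs := by
  intro ps
  induction ps with
  | nil =>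
    intro qs hlen _ _ _
    cases qs with
    | nil => rfl
    | cons q qs' => simp at hlen
  | cons p ps ih =>
    intro qs hlen hp hq hj
    cases qs with
    | nil => simp at hlen
    | cons q qs' =>
      cases ps with
      | nil =>
        cases qs' with
        | nil =>
          rw [PySem.Chars.join_singleton, PySem.Chars.join_singleton] at hj
          rw [hj]
        | cons q' qs'' => simp at hlen
      | cons p' ps' =>
        cases qs' with
        | nil => simp at hlen
        | cons q' qs'' =>
          rw [PySem.Chars.join_cons_cons, PySem.Chars.join_cons_cons] at hj
          have hj' : p ++ ' ' :: PySem.Chars.join [' '] (p' :: ps')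
              = q ++ ' ' :: PySem.Chars.join [' '] (q' :: qs'') := by
            simpa [List.append_assoc] using hj
          obtain ⟨hpq, hrest⟩ := pcSep_split ' ' p q _ _
            (hp p List.mem_cons_self).2 (hq q List.mem_cons_self).2 hj'
          have htails := ih (q' :: qs'') (by simpa using hlen)
            (fun t ht => hp t (List.mem_cons_of_mem _ ht))
            (fun t ht => hq t (List.mem_cons_of_mem _ ht)) hrest
          rw [hpq, htails]

-- every token Python's split() produces is nonempty and whitespace-free
lemma pcGo_ok : ∀ (s cur : List Char) (acc : List (List Char)),
    (∀ c ∈ cur, PySem.Chars.isspace c = false) →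
    (∀ t ∈ acc, t ≠ [] ∧ ∀ c ∈ t, PySem.Chars.isspace c = false) →
    ∀ t ∈ PySem.Chars.split₀.go s cur acc, t ≠ [] ∧ ∀ c ∈ t, PySem.Chars.isspace c = false := by
  intro s
  induction s with
  | nil =>
    intro cur acc hcur hacc t ht
    rw [show PySem.Chars.split₀.go [] cur acc
        = if cur.isEmpty then acc.reverse else (cur.reverse :: acc).reverse from by
      simp [PySem.Chars.split₀.go]] at ht
    by_cases hce : cur.isEmpty
    · rw [if_pos hce] at ht
      exact hacc t (List.mem_reverse.mp ht)
    · rw [if_neg hce] at ht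
      rcases List.mem_cons.mp (List.mem_reverse.mp ht) with h | h
      · subst h
        refine ⟨by simpa using (List.isEmpty_eq_false_iff.mp (Bool.eq_false_iff.mpr hce)), ?_⟩
        intro c hc
        exact hcur c (List.mem_reverse.mp hc)
      · exact hacc t h
  | cons c rest ih =>
    intro cur acc hcur hacc t ht
    rw [show PySem.Chars.split₀.go (c :: rest) cur acc
        = if PySem.Chars.isspace c then
            (if cur.isEmpty then PySem.Chars.split₀.go rest [] acc
             else PySem.Chars.split₀.go rest [] (cur.reverse :: acc))
          else PySem.Chars.split₀.go rest (c :: cur) acc from by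
      simp [PySem.Chars.split₀.go]] at ht
    by_cases hsp : PySem.Chars.isspace c = true
    · rw [if_pos hsp] at ht
      by_cases hce : cur.isEmpty
      · rw [if_pos hce] at ht
        exact ih [] acc (by simp) hacc t ht
      · rw [if_neg hce] at ht
        refine ih [] (cur.reverse :: acc) (by simp) ?_ t ht
        intro t' ht'
        rcases List.mem_cons.mp ht' with h | h
        · subst h
          refine ⟨by simpa using (List.isEmpty_eq_false_iff.mp (Bool.eq_false_iff.mpr hce)), ?_⟩
          intro c' hc'
          exact hcur c' (List.mem_reverse.mp hc')
        · exact hacc t' h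
    · rw [if_neg hsp] at ht
      refine ih (c :: cur) acc ?_ hacc t ht
      intro c' hc'
      rcases List.mem_cons.mp hc' with h | h
      · subst h; exact Bool.eq_false_iff.mpr hsp
      · exact hcur c' h

lemma pcSplit₀_ok (s : String) : ∀ t ∈ PySem.Str.split₀ s, t.toList ≠ [] ∧ ' ' ∉ t.toList := by
  intro t ht
  obtain ⟨cs, hcs, hEq⟩ := List.mem_map.mp ht
  have hok := pcGo_ok s.toList [] [] (by simp) (by simp) cs hcs
  subst hEq
  rw [String.toList_ofList]
  refine ⟨hok.1, fun hm => ?_⟩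
  have := hok.2 ' ' hm
  rw [show PySem.Chars.isspace ' ' = true from by decide] at this
  cases this

lemma pcOv_rhs_ok (block : List String) (q : String × String) (hq : q ∈ pcOv block) :
    q.2.toList ≠ [] ∧ ' ' ∉ q.2.toList := by
  unfold pcOv at hq
  obtain ⟨l, hl, hf⟩ := List.mem_filterMap.mp hq
  unfold pcCopy? at hf
  cases h : PySem.Str.split₀ l with
  | nil => rw [h] at hf; cases hf
  | cons a t1 =>
    cases t1 with
    | nil => rw [h] at hf; cases hf
    | cons b t2 =>
      cases t2 with
      | nil => rw [h] at hf; cases hf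
      | cons c t3 =>
        cases t3 with
        | nil =>
          rw [h] at hf
          dsimp only at hf
          by_cases hb : b = ":="
          · rw [if_pos hb] at hf
            cases hf
            exact pcSplit₀_ok l c (by rw [h]; simp)
          · rw [if_neg hb] at hf; cases hf
        | cons e t4 => rw [h] at hf; cases hf

lemma pcVal_ok (block : List String) (tok : String) (h : tok.toList ≠ [] ∧ ' ' ∉ tok.toList) :
    (pcVal block tok).toList ≠ [] ∧ ' ' ∉ (pcVal block tok).toList := by
  unfold pcVal
  cases hm : pcLastm (fun q : String × String => q.1 = tok) (pcOv block) with
  | none => simpa using h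
  | some r =>
    simp only [Option.map_some, Option.getD_some]
    exact pcOv_rhs_ok block r (pcLastm_mem _ (pcOv block) r hm).1

lemma pcToList_inj : Function.Injective String.toList := fun _ _ h => String.ext h

lemma pcStr_append_cancel (s : String) {x y : String} (h : s ++ x = s ++ y) : x = y := by
  have h2 := congrArg String.toList h
  rw [String.toList_append, String.toList_append] at h2
  exact pcToList_inj (List.append_cancel_left h2)

-- the ' '-joined rebuilt lines are distinct when the token lists are
lemma pcJoinStr_inj (u v : List String) (hlen : u.length = v.length)
    (hu : ∀ t ∈ u, t.toList ≠ [] ∧ ' ' ∉ t.toList)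
    (hv : ∀ t ∈ v, t.toList ≠ [] ∧ ' ' ∉ t.toList)
    (h : PySem.Str.join " " u = PySem.Str.join " " v) : u = v := by
  unfold PySem.Str.join PySem.Chars.join at h
  have h2 := congrArg String.toList h
  rw [String.toList_ofList, String.toList_ofList] at h2
  have h3 := pcJoin_inj (u.map String.toList) (v.map String.toList) (by simp [hlen])
    (by intro t ht; obtain ⟨x, hx, hEq⟩ := List.mem_map.mp ht; exact hEq ▸ hu x hx)
    (by intro t ht; obtain ⟨x, hx, hEq⟩ := List.mem_map.mp ht; exact hEq ▸ hv x hx)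
    (by simpa using h2)
  exact (List.map_injective_iff.mpr pcToList_inj) h3

-- disagreement on every line D_'s condition names
set_option maxHeartbeats 1000000 in
lemma pcLine_ne (block : List String) (line : String) (j : Nat) (hj : j < (pcTl line).length)
    (hnt : pcVal block ((pcTl line).getD j "") ≠ (pcTl line).getD j "")
    (hne : j ≠ pcIdx block line) :
    pcPer block line ≠ pcQ block line := by
  rw [pcQ_eq]
  unfold pcPer
  rw [List.getD_eq_getElem _ _ hj] at hnt
  obtain ⟨r, hm, hrmem, hrk⟩ := pcVal_ne_imp block _ hnt
  have htokmem : (pcTl line)[j] ∈ pcTl line := List.getElem_mem hj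
  have hwiS := pcLastm_isSome (fun q : String × String => q.1 ∈ pcTl line) (pcOv block) r
    hrmem (by show r.1 ∈ pcTl line; rw [hrk]; exact htokmem)
  obtain ⟨p, hw⟩ := Option.isSome_iff_exists.mp hwiS
  rw [hw]
  obtain ⟨hpmem, hptl⟩ := pcLastm_mem _ (pcOv block) p hw
  have hproj := pcWin_proj block line p hw
  have hg : (pcTl line).any (fun tok =>
      (pcLastm (fun q : String × String => q.1 = tok) (pcOv block)).isSome) = true :=
    List.any_eq_true.mpr ⟨p.1, hptl, by rw [hproj]; rfl⟩
  obtain ⟨i₀, hidx⟩ := Option.isSome_iff_exists.mp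
    ((PySem.List.index?_isSome_iff (pcTl line) p.1).mpr hptl)
  obtain ⟨hi₀len, hi₀val, -⟩ := PySem.List.getElem_of_index?_eq_some hidx
  have hpcidx := pcIdx_eq block line p i₀ hw hidx
  rw [hpcidx] at hne
  rw [if_pos hg]
  dsimp only
  unfold pcR
  rw [hidx]
  simp only [Option.getD_some]
  intro hEq
  have h3 := pcStr_append_cancel _ hEq
  have h4 : (pcTl line).set i₀ p.2 = (pcTl line).map (pcVal block) := by
    apply pcJoinStr_inj _ _ (by simp)
    · intro t ht
      rcases List.mem_or_eq_of_mem_set ht with h | h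
      · exact pcSplit₀_ok line t (List.mem_of_mem_tail h)
      · subst h; exact pcOv_rhs_ok block p hpmem
    · intro t ht
      obtain ⟨x, hx, hEq'⟩ := List.mem_map.mp ht
      exact hEq' ▸ pcVal_ok block x (pcSplit₀_ok line x (List.mem_of_mem_tail hx))
    · exact h3
  have h5 := List.getElem_of_eq h4 (show j < ((pcTl line).set i₀ p.2).length by simpa using hj)
  rw [List.getElem_set_ne (fun hEq' => hne hEq'.symm), List.getElem_map] at h5
  exact hnt (h5.symm)

-- ===== bridge: the compact D_ formulation equals the positional one used by the lemmas =====

lemma pcLastm_getLast {α : Type} (p : α → Prop) [DecidablePred p] :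
    ∀ l : List α, pcLastm p l = (l.filter (fun x => decide (p x))).getLast? := by
  intro l
  induction l with
  | nil => rfl
  | cons x l ih =>
    simp only [pcLastm, ih, List.filter_cons]
    by_cases h : p x
    · rw [if_pos (show decide (p x) = true by simpa using h), List.getLast?_cons]
      cases hm : (List.filter (fun x => decide (p x)) l).getLast? with
      | some y => simp
      | none => simp [h]
    · rw [if_neg (show ¬ decide (p x) = true by simpa using h)]
      cases hm : (List.filter (fun x => decide (p x)) l).getLast? with
      | some y => rfl
      | none => simp [h]

lemma pcLast_eq (block : List String) (p : String × String → Prop) [DecidablePred p]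
    (q : String × String → Bool) (h : ∀ x, q x = decide (p x)) :
    pcLast block q = pcLastm p (pcOv block) := by
  unfold pcLast pcOv
  rw [pcLastm_getLast, List.filter_congr (fun x _ => h x)]

lemma pcD_iff (block : List String) :
    D_propagacao_copia block ↔ ∃ line ∈ block, ∃ j < (pcTl line).length,
      pcVal block ((pcTl line).getD j "") ≠ (pcTl line).getD j "" ∧ j ≠ pcIdx block line := by
  unfold D_propagacao_copia
  constructor
  · rintro ⟨t, ht, p, hp, h1, h2⟩
    obtain ⟨l, hl, rfl⟩ := List.mem_map.mp ht
    obtain ⟨-, hlen, hx⟩ := List.mem_zipIdx hp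
    have hlen' : p.2 < (pcTl l).length := by simpa using hlen
    have hx' : p.1 = (pcTl l)[p.2] := by simpa using hx
    rw [pcLast_eq block (fun c => c.1 = p.1) _
      (fun x => by by_cases h : x.1 = p.1 <;> simp [h])] at h1
    rw [pcLast_eq block (fun c => c.1 ∈ pcTl l) _
      (fun x => by by_cases h : x.1 ∈ pcTl l <;> simp [h, List.contains_iff_mem])] at h2
    refine ⟨l, hl, p.2, hlen', ?_, ?_⟩
    · rw [List.getD_eq_getElem _ _ hlen', ← hx']
      cases hm : pcLastm (fun c : String × String => c.1 = p.1) (pcOv block) with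
      | none => rw [hm] at h1; cases h1
      | some r =>
        rw [hm] at h1
        have hr2 : r.2 ≠ p.1 := by simpa using h1
        unfold pcVal
        rw [hm]
        simpa using hr2
    · cases hw : pcLastm (fun c : String × String => c.1 ∈ pcTl l) (pcOv block) with
      | none => rw [hw] at h2; cases h2
      | some w =>
        rw [hw] at h2
        have hw2 : (pcTl l).idxOf? w.1 ≠ some p.2 := by simpa using h2
        have hwm := pcLastm_mem _ (pcOv block) w hw
        obtain ⟨i₀, hidx⟩ := Option.isSome_iff_exists.mp
          ((PySem.List.index?_isSome_iff (pcTl l) w.1).mpr hwm.2)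
        unfold pcIdx
        rw [hw]
        simp only [Option.map_some, Option.getD_some]
        rw [PySem.List.index?_eq_idxOf?] at hidx ⊢
        rw [hidx]
        intro hEq
        exact hw2 (by rw [hidx, hEq]; rfl)
  · rintro ⟨l, hl, j, hj, h1, h2⟩
    rw [List.getD_eq_getElem _ _ hj] at h1
    obtain ⟨r, hm, hrmem, hrk⟩ := pcVal_ne_imp block _ h1
    have hr2 : r.2 ≠ (pcTl l)[j] := by
      intro hEq
      apply h1
      unfold pcVal
      rw [hm]
      simp [hEq]
    have htokmem : (pcTl l)[j] ∈ pcTl l := List.getElem_mem hj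
    have hwiS := pcLastm_isSome (fun c : String × String => c.1 ∈ pcTl l) (pcOv block) r
      hrmem (by show r.1 ∈ pcTl l; rw [hrk]; exact htokmem)
    obtain ⟨w, hw⟩ := Option.isSome_iff_exists.mp hwiS
    have hwm := pcLastm_mem _ (pcOv block) w hw
    obtain ⟨i₀, hidx⟩ := Option.isSome_iff_exists.mp
      ((PySem.List.index?_isSome_iff (pcTl l) w.1).mpr hwm.2)
    have hIdx : pcIdx block l = i₀ := by
      unfold pcIdx
      rw [hw]
      simp only [Option.map_some, Option.getD_some]
      rw [hidx]
      rfl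
    rw [hIdx] at h2
    refine ⟨pcTl l, List.mem_map_of_mem hl, ((pcTl l)[j], j), ?_, ?_, ?_⟩
    · have hz : (pcTl l).zipIdx[j]'(by simpa using hj) = ((pcTl l)[j], j) := by
        simp [List.getElem_zipIdx]
      exact hz ▸ List.getElem_mem _
    · rw [pcLast_eq block (fun c => c.1 = (pcTl l)[j]) _
        (fun x => by by_cases h : x.1 = (pcTl l)[j] <;> simp [h])]
      rw [hm]
      simpa using hr2
    · rw [pcLast_eq block (fun c => c.1 ∈ pcTl l) _
        (fun x => by by_cases h : x.1 ∈ pcTl l <;> simp [h, List.contains_iff_mem])]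
      rw [hw]
      have hidx' : (pcTl l).idxOf? w.1 = some i₀ := by
        rw [← PySem.List.index?_eq_idxOf?]; exact hidx
      simp only [Option.any_some, hidx']
      simpa using fun hEq => h2 hEq.symm

-- ===== VERDICT (by name: the statement is the Claim_ definition above) =====
theorem propagacao_copia_spec : Claim_unchanged_propagacao_copia := by
  intro block _
  unfold Spec_propagacao_copia
  intro hD
  rw [pcA_eq, pcB_eq]
  apply List.map_congr_left
  intro line hline
  apply pcLine_eq
  intro j hjlen hnt
  by_contra hne
  exact hD ((pcD_iff block).mpr ⟨line, hline, j, hjlen, hnt, hne⟩)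

theorem propagacao_copia_changed : Claim_changed_propagacao_copia := by
  unfold Claim_changed_propagacao_copia; decide

theorem propagacao_copia_tight : Claim_exact_propagacao_copia := by
  intro block _ hD
  rw [pcA_eq, pcB_eq]
  intro hEq
  obtain ⟨line, hline, j, hj, hnt, hne⟩ := (pcD_iff block).mp hD
  exact pcLine_ne block line j hj hnt hne (List.map_inj_left.mp hEq line hline)
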